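-- pv_equiv track=rewrite | github.com/nextgis/nextgisweb | nextgisweb/lib/ows/__init__.py | get_work_version
-- ===== SOURCE A (Python) =====
-- def get_work_version(p_version, p_acceptversions, version_supported, version_default):
--     version = p_version
--     if version is None:
--         if p_acceptversions is not None:
--             accept_versions = sorted(p_acceptversions.split(","), reverse=True)
--             for v in accept_versions:
--                 if v in version_supported:
--                     version = v
--                     break
--         else:
--             version = version_default
--
--     return version if version in version_supported else None
-- ===== SOURCE B (Python) =====
-- def get_work_version(p_version, p_acceptversions, version_supported, version_default):
--     if p_version is not None:
--         return p_version if p_version in version_supported else None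
--     if p_acceptversions is None:
--         return version_default if version_default in version_supported else None
--     accepted = set(p_acceptversions.split(","))
--     best = None
--     for s in version_supported:
--         if s in accepted and (best is None or best < s):
--             best = s
--     return best
-- ===== Notes on version B (the rewrite author's own statement) =====
-- stated objective: alternative
-- what changed: Instead of reverse-sorting the accepted versions and scanning for the first supported one, B builds a set of accepted tokens once and does a running-max loop over version_supported, with early returns replacing the shared final gate.
import Mathlib
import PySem

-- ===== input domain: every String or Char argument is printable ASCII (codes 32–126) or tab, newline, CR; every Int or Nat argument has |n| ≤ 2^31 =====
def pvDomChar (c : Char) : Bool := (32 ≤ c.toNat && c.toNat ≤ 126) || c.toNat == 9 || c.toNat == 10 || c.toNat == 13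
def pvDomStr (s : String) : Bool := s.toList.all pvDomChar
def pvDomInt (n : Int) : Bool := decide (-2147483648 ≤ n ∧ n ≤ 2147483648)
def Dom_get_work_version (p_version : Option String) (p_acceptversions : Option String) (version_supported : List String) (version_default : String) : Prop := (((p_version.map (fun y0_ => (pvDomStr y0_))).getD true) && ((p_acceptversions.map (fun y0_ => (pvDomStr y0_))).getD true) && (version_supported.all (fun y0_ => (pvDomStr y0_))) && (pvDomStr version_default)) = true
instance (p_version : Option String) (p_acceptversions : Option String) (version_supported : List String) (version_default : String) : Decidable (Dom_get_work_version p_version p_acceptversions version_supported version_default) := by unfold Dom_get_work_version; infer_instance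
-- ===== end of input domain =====

-- B replaces A's reverse sort + first-supported scan by a set of the accepted tokens and
-- a running-max loop over version_supported with early returns (alternative traversal);
-- return values proved equal on all inputs.

-- ===== PORT A =====
def get_work_version (p_version : Option String) (p_acceptversions : Option String) (version_supported : List String) (version_default : String) : Option String :=
  let version : Option String :=
    match p_version with
    | some v => some v
    | none =>
      match p_acceptversions with
      | some av =>
        let accept_versions := PySem.List.sorted ((PySem.Chars.splitOn av.toList ",".toList).map String.ofList) (fun x => x) true
        accept_versions.foldl (fun acc v =>
          match acc with
          | some _ => acc
          | none => if version_supported.contains v then some v else none) none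
      | none => some version_default
  match version with
  | some v => if version_supported.contains v then some v else none
  | none => none

-- ===== PORT B =====
def get_work_version_alt (p_version : Option String) (p_acceptversions : Option String) (version_supported : List String) (version_default : String) : Option String :=
  match p_version with
  | some v => if version_supported.contains v then some v else none
  | none =>
    match p_acceptversions with
    | none => if version_supported.contains version_default then some version_default else none
    | some av =>
      let accepted : PySem.Set String :=
        PySem.Set.ofList ((PySem.Chars.splitOn av.toList ",".toList).map String.ofList)
      version_supported.foldl (fun best s =>
        if PySem.Set.contains accepted s &&
            (match best with | none => true | some b => decide (b < s))
        then some s else best) none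

-- ===== PRECONDITION & SPEC =====
def Spec_get_work_version (p_version : Option String) (p_acceptversions : Option String) (version_supported : List String) (version_default : String) (out : Option String) : Prop := out = get_work_version_alt p_version p_acceptversions version_supported version_default
instance (p_version : Option String) (p_acceptversions : Option String) (version_supported : List String) (version_default : String) (out : Option String) : Decidable (Spec_get_work_version p_version p_acceptversions version_supported version_default out) := by unfold Spec_get_work_version; infer_instance

-- ===== CLAIM (what is proved, stated in full; the proofs are below) =====
def Claim_equal_get_work_version : Prop := ∀ (p_version : Option String) (p_acceptversions : Option String) (version_supported : List String) (version_default : String), Dom_get_work_version p_version p_acceptversions version_supported version_default → Spec_get_work_version p_version p_acceptversions version_supported version_default (get_work_version p_version p_acceptversions version_supported version_default)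

-- ===== LEMMAS AND PROOFS =====

-- pure running-max step (proof-only helper)
def pvOmax (b? : Option String) (s : String) : Option String :=
  match b? with
  | none => some s
  | some b => if b < s then some s else some b

-- once A's loop accumulator is some, it stays
theorem pv_foldl_some (p : String → Bool) (xs : List String) (a : String) :
    xs.foldl (fun acc v => match acc with
      | some _ => acc
      | none => if p v then some v else none) (some a) = some a := by
  induction xs with
  | nil => rfl
  | cons x t ih => simpa using ih

-- A's loop is find?
theorem pv_foldl_find (p : String → Bool) (xs : List String) :
    xs.foldl (fun acc v => match acc with
      | some _ => acc
      | none => if p v then some v else none) none = xs.find? p := by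
  induction xs with
  | nil => rfl
  | cons x t ih =>
    by_cases h : p x
    · simp [List.foldl_cons, h, pv_foldl_some]
    · simpa [List.foldl_cons, h, List.find?_cons] using ih

theorem pv_find_head_filter (p : String → Bool) (xs : List String) :
    xs.find? p = (xs.filter p).head? := by
  induction xs with
  | nil => rfl
  | cons x t ih =>
    by_cases h : p x
    · rw [List.find?_cons_of_pos (p := p) h, List.filter_cons_of_pos h]
      rfl
    · rw [List.find?_cons_of_neg (p := p) (by simpa using h),
        List.filter_cons_of_neg (by simpa using h), ih]

-- A's branch value characterised: first supported member of the reverse-sorted list is a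
-- supported member dominating all supported members
theorem pv_A_char (p : String → Bool) (l : List String) (m : String)
    (h : (PySem.List.sorted l (fun x => x) true).foldl (fun acc v => match acc with
      | some _ => acc
      | none => if p v then some v else none) none = some m) :
    m ∈ l.filter p ∧ ∀ y ∈ l.filter p, y ≤ m := by
  rw [pv_foldl_find, pv_find_head_filter] at h
  set s := PySem.List.sorted l (fun x => x) true with hs
  have hperm : (s.filter p).Perm (l.filter p) :=
    (PySem.List.sorted_perm l (fun x => x) true).filter p
  have hpw : (s.filter p).Pairwise (fun a b => b ≤ a) :=
    (PySem.List.sorted_pairwise_rev l (fun x => x)).filter p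
  cases hfs : s.filter p with
  | nil => simp [hfs] at h
  | cons m' t =>
    rw [hfs] at h
    obtain rfl : m' = m := by simpa [List.head?] using h
    refine ⟨hperm.mem_iff.mp (by simp [hfs]), ?_⟩
    intro y hy
    rcases List.mem_cons.mp (hfs ▸ hperm.mem_iff.mpr hy) with h' | h'
    · exact le_of_eq h'
    · exact (List.pairwise_cons.mp (hfs ▸ hpw)).1 y h'

theorem pv_A_none (p : String → Bool) (l : List String)
    (h : (PySem.List.sorted l (fun x => x) true).foldl (fun acc v => match acc with
      | some _ => acc
      | none => if p v then some v else none) none = none) :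
    l.filter p = [] := by
  rw [pv_foldl_find, pv_find_head_filter] at h
  have hperm : ((PySem.List.sorted l (fun x => x) true).filter p).Perm (l.filter p) :=
    (PySem.List.sorted_perm l (fun x => x) true).filter p
  have : (PySem.List.sorted l (fun x => x) true).filter p = [] := by
    cases hfs : (PySem.List.sorted l (fun x => x) true).filter p with
    | nil => rfl
    | cons a t => rw [hfs] at h; simp [List.head?] at h
  exact ((this ▸ hperm).symm).eq_nil

-- B's loop is the pure running max over the filtered list
theorem pv_B_fold (p : String → Bool) (xs : List String) (acc : Option String) :
    xs.foldl (fun best s =>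
        if p s && (match best with | none => true | some b => decide (b < s))
        then some s else best) acc
      = (xs.filter p).foldl pvOmax acc := by
  induction xs generalizing acc with
  | nil => rfl
  | cons x t ih =>
    rw [List.foldl_cons, ih]
    by_cases h : p x
    · rw [List.filter_cons_of_pos h, List.foldl_cons]
      congr 1
      cases acc with
      | none => simp [pvOmax, h]
      | some b => by_cases hb : b < x <;> simp [pvOmax, h, hb]
    · rw [List.filter_cons_of_neg (by simpa using h)]
      congr 1
      simp [h]

theorem pv_omax_some (t : List String) (b : String) :
    ∃ m, t.foldl pvOmax (some b) = some m ∧ b ≤ m := by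
  induction t generalizing b with
  | nil => exact ⟨b, rfl, le_rfl⟩
  | cons x t ih =>
    by_cases h : b < x
    · obtain ⟨m, hm, hx⟩ := ih x
      exact ⟨m, by simpa [List.foldl_cons, pvOmax, h] using hm, le_of_lt (lt_of_lt_of_le h hx)⟩
    · obtain ⟨m, hm, hb⟩ := ih b
      exact ⟨m, by simpa [List.foldl_cons, pvOmax, h] using hm, hb⟩

theorem pv_omax_sound (xs : List String) :
    ∀ (acc : Option String) (m : String), xs.foldl pvOmax acc = some m →
      (acc = some m ∨ m ∈ xs) ∧ (∀ y ∈ xs, y ≤ m) ∧ (∀ b, acc = some b → b ≤ m) := by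
  induction xs with
  | nil =>
    intro acc m h
    simp only [List.foldl_nil] at h
    exact ⟨Or.inl h, by simp, fun b hb => by rw [h] at hb; exact le_of_eq (Option.some.inj hb).symm⟩
  | cons x t ih =>
    intro acc m h
    simp only [List.foldl_cons] at h
    obtain ⟨hmem, hbound, hmono⟩ := ih (pvOmax acc x) m h
    have hx : ∃ c, pvOmax acc x = some c ∧ x ≤ c ∧ (∀ b, acc = some b → b ≤ c) := by
      cases acc with
      | none => exact ⟨x, rfl, le_rfl, by simp⟩
      | some b =>
        by_cases hb : b < x
        · exact ⟨x, by simp [pvOmax, hb], le_rfl,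
            fun b' hb' => le_of_lt (Option.some.inj hb' ▸ hb)⟩
        · exact ⟨b, by simp [pvOmax, hb], le_of_not_gt hb,
            fun b' hb' => le_of_eq (Option.some.inj hb').symm⟩
    obtain ⟨c, hc, hxc, haccc⟩ := hx
    have hcm : c ≤ m := hmono c hc
    refine ⟨?_, ?_, fun b hb => le_trans (haccc b hb) hcm⟩
    · rcases hmem with h' | h'
      · rw [hc] at h'
        obtain rfl : c = m := Option.some.inj h'
        cases acc with
        | none => exact Or.inr (by simp [pvOmax] at hc; simp [hc])
        | some b =>
          by_cases hb : b < x
          · simp [pvOmax, hb] at hc; exact Or.inr (by simp [hc])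
          · simp [pvOmax, hb] at hc; exact Or.inl (by simp [hc])
      · exact Or.inr (List.mem_cons_of_mem x h')
    · intro y hy
      rcases List.mem_cons.mp hy with rfl | hy'
      · exact le_trans hxc hcm
      · exact hbound y hy'

-- membership bridge between the two filtered lists
theorem pv_mem_bridge (l supported : List String) (v : String) :
    v ∈ l.filter (fun w => supported.contains w) ↔
      v ∈ supported.filter (fun s => PySem.Set.contains (PySem.Set.ofList l) s) := by
  simp only [List.mem_filter, PySem.Set.contains, List.contains_iff_mem, PySem.Set.mem_ofList]
  tauto

-- ===== VERDICT (by name: the statement is the Claim_ definition above) =====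
theorem get_work_version_spec : Claim_equal_get_work_version := by
  intro p_version p_acceptversions version_supported version_default _
  unfold Spec_get_work_version get_work_version get_work_version_alt
  cases p_version with
  | some v => rfl
  | none =>
    cases p_acceptversions with
    | none => rfl
    | some av =>
      simp only []
      set l := (PySem.Chars.splitOn av.toList ",".toList).map String.ofList with hl
      set p : String → Bool := fun w => version_supported.contains w with hp
      rw [pv_B_fold (fun s => PySem.Set.contains (PySem.Set.ofList l) s) version_supported none]
      cases hA : (PySem.List.sorted l (fun x => x) true).foldl (fun acc v => match acc with
          | some _ => acc
          | none => if p v then some v else none) none with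
      | none =>
        have hfe := pv_A_none p l hA
        have hB : version_supported.filter (fun s => PySem.Set.contains (PySem.Set.ofList l) s) = [] := by
          rw [List.eq_nil_iff_forall_not_mem]
          intro v hv
          exact (List.eq_nil_iff_forall_not_mem.mp hfe v) ((pv_mem_bridge l version_supported v).mpr hv)
        rw [hB]
        rfl
      | some m =>
        obtain ⟨hmem, hbound⟩ := pv_A_char p l m hA
        have hpm : p m = true := (List.mem_filter.mp hmem).2
        cases hB : version_supported.filter (fun s => PySem.Set.contains (PySem.Set.ofList l) s) with
        | nil =>
          exact absurd ((pv_mem_bridge l version_supported m).mp hmem) (by rw [hB]; exact List.not_mem_nil)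
        | cons x t =>
          rw [List.foldl_cons, show (pvOmax none x) = some x from rfl]
          obtain ⟨m', hm', _⟩ := pv_omax_some t x
          rw [hm']
          obtain ⟨hmem', hbound', hmono'⟩ := pv_omax_sound t (some x) m' hm'
          -- m' ∈ the A-filtered list
          have hm'mem : m' ∈ l.filter p := by
            refine (pv_mem_bridge l version_supported m').mpr ?_
            rw [hB]
            rcases hmem' with h' | h'
            · exact List.mem_cons.mpr (Or.inl (Option.some.inj h').symm)
            · exact List.mem_cons_of_mem x h'
          -- mutual domination → equality
          have h1 : m' ≤ m := hbound m' hm'mem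
          have h2 : m ≤ m' := by
            have hmB : m ∈ version_supported.filter
                (fun s => PySem.Set.contains (PySem.Set.ofList l) s) :=
              (pv_mem_bridge l version_supported m).mp hmem
            rw [hB] at hmB
            rcases List.mem_cons.mp hmB with rfl | h'
            · exact hmono' m rfl
            · exact hbound' m h'
          obtain rfl : m = m' := le_antisymm h2 h1
          have hm2 : m ∈ version_supported := List.contains_iff_mem.mp hpm
          simp [hm2]
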